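-- pv_equiv track=rewrite | github.com/SullivanC19/market-for-lms | scripts/wildbench_judge_parse.py | first_balanced_json_object
-- ===== SOURCE A (Python) =====
-- def first_balanced_json_object(text: str) -> str | None:
--     """First top-level {...} respecting JSON double-quoted strings and escapes."""
--     start = text.find("{")
--     if start == -1:
--         return None
--     depth = 0
--     i = start
--     in_str = False
--     escape = False
--     n = len(text)
--     while i < n:
--         c = text[i]
--         if in_str:
--             if escape:
--                 escape = False
--             elif c == "\\":
--                 escape = True
--             elif c == '"':
--                 in_str = False
--             i += 1
--             continue
--         if c == '"':
--             in_str = True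
--             i += 1
--             continue
--         if c == "{":
--             depth += 1
--         elif c == "}":
--             depth -= 1
--             if depth == 0:
--                 return text[start : i + 1]
--         i += 1
--     return None
-- ===== SOURCE B (Python) =====
-- import re
--
-- # One token = a complete double-quoted string (escapes handled; an unterminated
-- # string, possibly ending in a lone backslash, runs to end of text) OR a single brace.
-- _TOKEN = re.compile(r'"(?:\\[\s\S]|[^"\\])*(?:"|\\?$)|[{}]')
--
--
-- def first_balanced_json_object(text: str) -> str | None:
--     """First top-level {...}: regex-tokenize from the first '{' and track brace depth."""
--     start = text.find("{")
--     if start == -1: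
--         return None
--     depth = 0
--     for m in _TOKEN.finditer(text, start):
--         t = m.group()
--         if t == "{":
--             depth += 1
--         elif t == "}":
--             depth -= 1
--             if depth == 0:
--                 return text[start:m.end()]
--     return None
-- ===== Notes on version B (the rewrite author's own statement) =====
-- stated objective: idiomatic
-- what changed: A's hand-rolled per-character state machine with in_str/escape boolean flags is replaced by regex tokenization: re.finditer with a pattern matching a whole double-quoted JSON string (escapes included) or a single brace, and a depth counter over the token stream.
import Mathlib
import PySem

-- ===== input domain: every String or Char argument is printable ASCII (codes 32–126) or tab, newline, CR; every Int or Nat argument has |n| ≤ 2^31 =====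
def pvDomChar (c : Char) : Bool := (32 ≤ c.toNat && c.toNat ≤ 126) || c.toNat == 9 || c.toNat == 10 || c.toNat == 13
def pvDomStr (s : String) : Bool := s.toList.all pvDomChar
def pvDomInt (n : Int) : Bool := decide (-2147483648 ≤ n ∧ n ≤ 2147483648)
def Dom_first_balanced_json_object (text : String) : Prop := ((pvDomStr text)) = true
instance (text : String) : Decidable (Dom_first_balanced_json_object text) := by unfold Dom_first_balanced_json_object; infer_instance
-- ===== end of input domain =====

-- B replaces A's per-character in_str/escape state machine by regex tokenization
-- (whole-string tokens or single braces via re.finditer) with a depth counter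
-- over the token stream (idiomatic alternative, same cost).

-- ===== PORT A =====
-- A's while-loop as structural recursion on the suffix starting at the first '{'.
-- `ts` is text[start:] (the list from the first '{'); `j` is i - start, so
-- text[start : i + 1] = String.ofList (ts.take (j + 1)).
def pvA_loop (ts : List Char) : List Char → Nat → Int → Bool → Bool → Option String
  | [], _, _, _, _ => none
  | c :: rest, j, depth, inStr, esc =>
    if inStr then
      if esc then pvA_loop ts rest (j + 1) depth true false
      else if c = '\\' then pvA_loop ts rest (j + 1) depth true true
      else if c = '"' then pvA_loop ts rest (j + 1) depth false false
      else pvA_loop ts rest (j + 1) depth true false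
    else if c = '"' then pvA_loop ts rest (j + 1) depth true false
    else if c = '{' then pvA_loop ts rest (j + 1) (depth + 1) false false
    else if c = '}' then
      (if depth - 1 = 0 then some (String.ofList (ts.take (j + 1)))
       else pvA_loop ts rest (j + 1) (depth - 1) false false)
    else pvA_loop ts rest (j + 1) depth false false

def first_balanced_json_object (text : String) : Option String :=
  let start := PySem.Str.find text "{"
  if start = -1 then none
  else
    let ts := text.toList.drop start.toNat
    pvA_loop ts ts 0 0 false false

-- ===== PORT B =====
-- The regex's string-token tail '(?:\\[\s\S]|[^"\\])*(?:"|\\?$)', matched just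
-- after the opening quote: returns (remaining suffix, number of chars consumed).
-- Hand port of the regex match (exact: the alternation is deterministic here).
def pvB_strtok : List Char → List Char × Nat
  | [] => ([], 0)
  | c :: rest =>
    if c = '\\' then
      let p := pvB_strtok (rest.drop 1)
      (p.1, p.2 + 2)
    else if c = '"' then (rest, 1)
    else
      let p := pvB_strtok rest
      (p.1, p.2 + 1)
termination_by l => l.length
decreasing_by
  · simp only [List.length_cons, List.length_drop]; omega
  · simp

theorem pvB_strtok_fst_drop (l : List Char) : (pvB_strtok l).1 = l.drop (pvB_strtok l).2 := by
  induction l using pvB_strtok.induct with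
  | case1 => simp [pvB_strtok]
  | case2 rest ih =>
      simp only [pvB_strtok]
      simp only [reduceIte]
      rw [ih, List.drop_drop]
      rw [List.drop_succ_cons]
      congr 1
      omega
  | case3 rest => simp [pvB_strtok]
  | case4 c rest h1 h2 ih =>
      simp only [pvB_strtok, if_neg h1, if_neg h2]
      rw [ih]
      simp

theorem pvB_strtok_len_le (l : List Char) : (pvB_strtok l).1.length ≤ l.length := by
  rw [pvB_strtok_fst_drop]; simp

-- The `for m in finditer` loop fused with the scanner: a string token is consumed
-- whole (pvB_strtok), a brace token updates depth, a non-token char is skipped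
-- by the regex scan; on '}' at depth 0 return text[start : m.end()].
def pvB_loop (ts : List Char) : List Char → Nat → Int → Option String
  | [], _, _ => none
  | c :: rest, j, depth =>
    if c = '"' then
      let p := pvB_strtok rest
      pvB_loop ts p.1 (j + 1 + p.2) depth
    else if c = '{' then pvB_loop ts rest (j + 1) (depth + 1)
    else if c = '}' then
      (if depth - 1 = 0 then some (String.ofList (ts.take (j + 1)))
       else pvB_loop ts rest (j + 1) (depth - 1))
    else pvB_loop ts rest (j + 1) depth
termination_by l => l.length
decreasing_by
  · exact Nat.lt_succ_of_le (pvB_strtok_len_le _)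
  all_goals simp

def first_balanced_json_object_alt (text : String) : Option String :=
  let start := PySem.Str.find text "{"
  if start = -1 then none
  else
    let ts := text.toList.drop start.toNat
    pvB_loop ts ts 0 0

-- ===== PRECONDITION & SPEC =====
def Spec_first_balanced_json_object (text : String) (out : Option String) : Prop := out = first_balanced_json_object_alt text
instance (text : String) (out : Option String) : Decidable (Spec_first_balanced_json_object text out) := by unfold Spec_first_balanced_json_object; infer_instance

-- ===== CLAIM (what is proved, stated in full; the proofs are below) =====
def Claim_equal_first_balanced_json_object : Prop := ∀ (text : String), Dom_first_balanced_json_object text → Spec_first_balanced_json_object text (first_balanced_json_object text)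

-- ===== LEMMAS AND PROOFS =====

-- Joint loop invariant, by strong induction on the suffix length:
-- outside a string the two loops agree, and A's in-string scan (esc = false)
-- equals B continuing after the regex string token.
theorem pv_loops_eq (n : Nat) : ∀ l : List Char, l.length ≤ n → ∀ (ts : List Char) (j : Nat) (depth : Int),
    pvA_loop ts l j depth false false = pvB_loop ts l j depth ∧
    pvA_loop ts l j depth true false =
      pvB_loop ts (pvB_strtok l).1 (j + (pvB_strtok l).2) depth := by
  induction n with
  | zero =>
      intro l hl ts j depth
      have : l = [] := List.length_eq_zero_iff.mp (Nat.le_zero.mp hl)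
      subst this
      simp [pvA_loop, pvB_loop, pvB_strtok]
  | succ n ih =>
      intro l hl ts j depth
      match l with
      | [] => simp [pvA_loop, pvB_loop, pvB_strtok]
      | c :: rest =>
        have hr : rest.length ≤ n := by simpa using hl
        constructor
        · -- outside string
          by_cases hq : c = '"'
          · subst hq
            have h2 := (ih rest hr ts (j + 1) depth).2
            simp [pvA_loop, pvB_loop, h2]
          · by_cases ho : c = '{'
            · subst ho
              have h1 := (ih rest hr ts (j + 1) (depth + 1)).1
              simp [pvA_loop, pvB_loop, h1]
            · by_cases hc : c = '}'
              · subst hc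
                have h1 := (ih rest hr ts (j + 1) (depth - 1)).1
                by_cases hd : depth - 1 = 0
                · simp [pvA_loop, pvB_loop, hd]
                · simp [pvA_loop, pvB_loop, hd, h1]
              · have h1 := (ih rest hr ts (j + 1) depth).1
                simp [pvA_loop, pvB_loop, hq, ho, hc, h1]
        · -- inside string, esc = false
          by_cases hb : c = '\\'
          · subst hb
            match rest with
            | [] =>
                simp [pvA_loop, pvB_loop, pvB_strtok]
            | d :: rest' =>
                have hr' : rest'.length ≤ n := by
                  simp at hl; omega
                have h2 := (ih rest' hr' ts (j + 1 + 1) depth).2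
                have harith : j + ((pvB_strtok rest').2 + 2) = j + 1 + 1 + (pvB_strtok rest').2 := by omega
                simp only [pvA_loop, pvB_strtok]
                simp only [reduceIte, List.drop_succ_cons, List.drop_zero, Bool.false_eq_true,
                  if_false]
                rw [harith, h2]
          · by_cases hq : c = '"'
            · subst hq
              have h1 := (ih rest hr ts (j + 1) depth).1
              simp [pvA_loop, pvB_strtok, h1]
            · have h2 := (ih rest hr ts (j + 1) depth).2
              have harith : j + ((pvB_strtok rest).2 + 1) = j + 1 + (pvB_strtok rest).2 := by omega
              simp only [pvA_loop, pvB_strtok, if_neg hb, if_neg hq, Bool.false_eq_true, if_false, if_true]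
              rw [harith, h2]

-- ===== VERDICT (by name: the statement is the Claim_ definition above) =====
theorem first_balanced_json_object_spec : Claim_equal_first_balanced_json_object := by
  intro text _
  unfold Spec_first_balanced_json_object first_balanced_json_object first_balanced_json_object_alt
  by_cases h : PySem.Chars.find text.toList "{".toList = -1
  · simp only [PySem.Str.find_eq]
    rw [if_pos h, if_pos h]
  · simp only [PySem.Str.find_eq, if_neg h]
    exact (pv_loops_eq _ _ le_rfl _ 0 0).1
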